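-- pv_equiv track=rewrite | github.com/zihao42/Face-VII | predict.py | generate_label_map
-- ===== SOURCE A (Python) =====
-- def generate_label_map(uk):
--     """
--     根据 uk（unknown key）生成正向标签映射字典。
--     例如，如果 uk 为 "sur"，则会舍弃标签 0，其余标签 [1,2,3,4,5,6] 会映射为 0~5。
--     """
--     if uk == "sur":
--         chosen_label = 0
--     elif uk == "fea":
--         chosen_label = 1
--     elif uk == "dis":
--         chosen_label = 2
--     elif uk == "hap":
--         chosen_label = 3
--     elif uk == "sad":
--         chosen_label = 4
--     elif uk == "ang":
--         chosen_label = 5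
--     elif uk == "neu":
--         chosen_label = 6
--     else:
--         chosen_label = None
--
--     valid_labels = [i for i in range(7) if i != chosen_label]
--     label_map = {orig: new for new, orig in enumerate(sorted(valid_labels))}
--     return label_map
-- ===== SOURCE B (Python) =====
-- # The function has only eight possible outputs (one per known key, plus the
-- # identity map for anything else), so precompute them all once and answer
-- # each call by a single table lookup instead of recomputing the remap.
-- _MAPS = {
--     "sur": {1: 0, 2: 1, 3: 2, 4: 3, 5: 4, 6: 5},
--     "fea": {0: 0, 2: 1, 3: 2, 4: 3, 5: 4, 6: 5},
--     "dis": {0: 0, 1: 1, 3: 2, 4: 3, 5: 4, 6: 5},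
--     "hap": {0: 0, 1: 1, 2: 2, 4: 3, 5: 4, 6: 5},
--     "sad": {0: 0, 1: 1, 2: 2, 3: 3, 5: 4, 6: 5},
--     "ang": {0: 0, 1: 1, 2: 2, 3: 3, 4: 4, 6: 5},
--     "neu": {0: 0, 1: 1, 2: 2, 3: 3, 4: 4, 5: 5},
-- }
-- _IDENTITY = {0: 0, 1: 1, 2: 2, 3: 3, 4: 4, 5: 5, 6: 6}
--
-- def generate_label_map(uk):
--     return dict(_MAPS.get(uk, _IDENTITY))
-- ===== Notes on version B (the rewrite author's own statement) =====
-- stated objective: alternative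
-- what changed: Replaces the if/elif chain plus build-filter-sort-enumerate computation with a complete precomputed table of all eight possible result dicts (one per known key, identity map otherwise), so each call is a single lookup with no per-call construction loop.
import Mathlib
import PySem

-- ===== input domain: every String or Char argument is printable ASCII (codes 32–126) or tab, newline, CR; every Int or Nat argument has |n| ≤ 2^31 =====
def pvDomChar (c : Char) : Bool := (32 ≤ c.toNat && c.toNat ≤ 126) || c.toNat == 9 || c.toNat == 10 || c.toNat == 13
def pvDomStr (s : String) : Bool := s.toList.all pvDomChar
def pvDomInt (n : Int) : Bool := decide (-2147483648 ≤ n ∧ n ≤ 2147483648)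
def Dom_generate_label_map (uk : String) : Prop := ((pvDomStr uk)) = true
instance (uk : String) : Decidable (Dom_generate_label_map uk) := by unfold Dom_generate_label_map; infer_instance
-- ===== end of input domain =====

-- B answers from a precomputed table of all eight possible result dicts (one per known
-- key, identity map otherwise) instead of computing the remap per call; objective: alternative.

-- ===== PORT A =====
def generate_label_map (uk : String) : List (Int × Int) :=
  let chosen_label : Option Int :=
    if uk == "sur" then some 0
    else if uk == "fea" then some 1
    else if uk == "dis" then some 2
    else if uk == "hap" then some 3
    else if uk == "sad" then some 4
    else if uk == "ang" then some 5
    else if uk == "neu" then some 6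
    else none
  -- i != chosen_label : an int is never equal to None in Python
  let valid_labels : List Int :=
    (PySem.List.pyRange 0 7 1).filter (fun i => !(some i == chosen_label))
  let sorted_labels := PySem.List.sorted valid_labels (fun x => x) false
  (PySem.List.enumerate sorted_labels).map (fun p => (p.2, p.1))

-- ===== PORT B =====
def pvMaps : PySem.Dict String (List (Int × Int)) :=
  PySem.Dict.ofList
    [ ("sur", [(1,0),(2,1),(3,2),(4,3),(5,4),(6,5)])
    , ("fea", [(0,0),(2,1),(3,2),(4,3),(5,4),(6,5)])
    , ("dis", [(0,0),(1,1),(3,2),(4,3),(5,4),(6,5)])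
    , ("hap", [(0,0),(1,1),(2,2),(4,3),(5,4),(6,5)])
    , ("sad", [(0,0),(1,1),(2,2),(3,3),(5,4),(6,5)])
    , ("ang", [(0,0),(1,1),(2,2),(3,3),(4,4),(6,5)])
    , ("neu", [(0,0),(1,1),(2,2),(3,3),(4,4),(5,5)]) ]

def pvIdentity : List (Int × Int) := [(0,0),(1,1),(2,2),(3,3),(4,4),(5,5),(6,6)]

-- dict(...) in Source B copies the looked-up dict; on the association-list representation the copy is the list itself
def generate_label_map_alt (uk : String) : List (Int × Int) :=
  pvMaps.getD uk pvIdentity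

-- ===== PRECONDITION & SPEC =====
def Spec_generate_label_map (uk : String) (out : List (Int × Int)) : Prop := out = generate_label_map_alt uk
instance (uk : String) (out : List (Int × Int)) : Decidable (Spec_generate_label_map uk out) := by unfold Spec_generate_label_map; infer_instance

-- ===== CLAIM =====
def Claim_equal_generate_label_map : Prop := ∀ (uk : String), Dom_generate_label_map uk → Spec_generate_label_map uk (generate_label_map uk)

-- ===== LEMMAS AND PROOFS =====

-- ===== VERDICT =====
theorem generate_label_map_spec : Claim_equal_generate_label_map := by
  intro uk _
  unfold Spec_generate_label_map generate_label_map generate_label_map_alt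
  by_cases h0 : uk = "sur"; · subst h0; decide
  by_cases h1 : uk = "fea"; · subst h1; decide
  by_cases h2 : uk = "dis"; · subst h2; decide
  by_cases h3 : uk = "hap"; · subst h3; decide
  by_cases h4 : uk = "sad"; · subst h4; decide
  by_cases h5 : uk = "ang"; · subst h5; decide
  by_cases h6 : uk = "neu"; · subst h6; decide
  have hB : pvMaps.getD uk pvIdentity = pvIdentity := by
    unfold PySem.Dict.getD
    have hT : pvMaps = PySem.Dict.mk
      [ ("sur", [(1,0),(2,1),(3,2),(4,3),(5,4),(6,5)])
      , ("fea", [(0,0),(2,1),(3,2),(4,3),(5,4),(6,5)])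
      , ("dis", [(0,0),(1,1),(3,2),(4,3),(5,4),(6,5)])
      , ("hap", [(0,0),(1,1),(2,2),(4,3),(5,4),(6,5)])
      , ("sad", [(0,0),(1,1),(2,2),(3,3),(5,4),(6,5)])
      , ("ang", [(0,0),(1,1),(2,2),(3,3),(4,4),(6,5)])
      , ("neu", [(0,0),(1,1),(2,2),(3,3),(4,4),(5,5)]) ] := by decide
    rw [hT]
    rw [PySem.Dict.get?_mk_cons, PySem.Dict.get?_mk_cons, PySem.Dict.get?_mk_cons,
      PySem.Dict.get?_mk_cons, PySem.Dict.get?_mk_cons, PySem.Dict.get?_mk_cons, PySem.Dict.get?_mk_cons]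
    simp [PySem.Dict.get?, beq_iff_eq, Ne.symm h0, Ne.symm h1, Ne.symm h2, Ne.symm h3,
      Ne.symm h4, Ne.symm h5, Ne.symm h6]
  rw [hB]
  simp only [beq_iff_eq, if_neg h0, if_neg h1, if_neg h2, if_neg h3, if_neg h4, if_neg h5, if_neg h6]
  decide
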